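-- pv_equiv track=rewrite | github.com/DPFNeiland/Python-Environment | Problems/BeeCrowd/bee3054.py | maior_submatriz_super_legal
-- ===== SOURCE A (Python) =====
-- def eh_legal(mat):
--     L = len(mat)
--     C = len(mat[0])
--
--     for i in range(1, L):
--         for j in range(1, C):
--             if mat[0][0] + mat[i][j] > mat[0][j] + mat[i][0]:
--                 return False
--     return True
--
-- def eh_super_legal(mat):
--     L = len(mat)
--     C = len(mat[0])
--
--     for l1 in range(L):
--         for l2 in range(l1 + 1, L):
--             for c1 in range(C):
--                 for c2 in range(c1 + 1, C):
--                     sub = [linha[c1:c2 + 1] for linha in mat[l1:l2 + 1]]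
--                     if not eh_legal(sub):
--                         return False
--     return True
--
-- def maior_submatriz_super_legal(A):
--     L = len(A)
--     C = len(A[0])
--     melhor = 0
--
--     for l1 in range(L):
--         for l2 in range(l1 + 1, L):
--             for c1 in range(C):
--                 for c2 in range(c1 + 1, C):
--                     sub = [linha[c1:c2 + 1] for linha in A[l1:l2 + 1]]
--
--                     if eh_super_legal(sub):
--                         area = (l2 - l1 + 1) * (c2 - c1 + 1)
--                         if area > melhor:
--                             melhor = area
--
--     return melhor
-- ===== SOURCE B (Python) =====
-- def maior_submatriz_super_legal(A):
--     L = len(A)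
--     C = len(A[0])
--     # precompute Monge validity of every adjacent 2x2 block once
--     good = [[A[i][j] + A[i + 1][j + 1] <= A[i][j + 1] + A[i + 1][j]
--              for j in range(C - 1)] for i in range(L - 1)]
--     melhor = 0
--     for l1 in range(L):
--         for l2 in range(l1 + 1, L):
--             for c1 in range(C):
--                 for c2 in range(c1 + 1, C):
--                     if all(good[i][j] for i in range(l1, l2) for j in range(c1, c2)):
--                         area = (l2 - l1 + 1) * (c2 - c1 + 1)
--                         if area > melhor:
--                             melhor = area
--     return melhor
-- ===== Notes on version B (the rewrite author's own statement) =====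
-- stated objective: faster
-- what changed: A decides each candidate rectangle by rebuilding slices and re-enumerating every sub-sub-rectangle through eh_super_legal/eh_legal; B precomputes once a grid of adjacent-2x2 Monge validity and decides a rectangle by a single scan of that grid (a rectangle is super-legal iff all its adjacent 2x2 blocks are Monge, by telescoping).
import Mathlib
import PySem

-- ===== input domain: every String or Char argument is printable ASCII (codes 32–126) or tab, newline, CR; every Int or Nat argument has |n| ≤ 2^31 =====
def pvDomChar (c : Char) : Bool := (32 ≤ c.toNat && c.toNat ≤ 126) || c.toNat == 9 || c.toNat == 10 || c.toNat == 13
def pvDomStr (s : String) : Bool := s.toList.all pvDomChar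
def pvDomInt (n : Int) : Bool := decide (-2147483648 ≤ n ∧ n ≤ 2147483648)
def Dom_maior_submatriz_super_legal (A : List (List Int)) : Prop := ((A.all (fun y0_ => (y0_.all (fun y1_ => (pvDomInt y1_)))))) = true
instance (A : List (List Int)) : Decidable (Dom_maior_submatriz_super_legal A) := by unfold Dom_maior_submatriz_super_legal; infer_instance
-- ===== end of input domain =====

-- B replaces A's per-rectangle re-enumeration of all sub-sub-rectangles (eh_super_legal/eh_legal
-- on freshly built slices) by one precomputed grid of adjacent-2x2 Monge validity scanned over
-- each rectangle: an exact, asymptotically faster algorithm (Monge telescoping argument).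

-- ===== PORT A =====
-- matrix entry m[i][j]; every use below is at an in-range index under Pre_, where Python's
-- m[i][j] is exactly this getD (out-of-range indexing raises in Python; excluded by Pre_)
def pvIdx (m : List (List Int)) (i j : Nat) : Int := (m.getD i []).getD j 0

-- Python's [linha[c1:c2+1] for linha in m[l1:l2+1]]; the slice arguments are nonneg here,
-- where Python's slice is exactly drop/take
def pvSlice (m : List (List Int)) (l1 l2 c1 c2 : Nat) : List (List Int) :=
  ((m.drop l1).take (l2 + 1 - l1)).map (fun linha => (linha.drop c1).take (c2 + 1 - c1))

-- the for/for loop with early `return False` is exactly a nested List.all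
def eh_legal (mat : List (List Int)) : Bool :=
  let L := mat.length
  let C := (mat.headI).length
  (List.range' 1 (L - 1)).all fun i =>
    (List.range' 1 (C - 1)).all fun j =>
      !(pvIdx mat 0 0 + pvIdx mat i j > pvIdx mat 0 j + pvIdx mat i 0)

def eh_super_legal (mat : List (List Int)) : Bool :=
  let L := mat.length
  let C := (mat.headI).length
  (List.range L).all fun l1 =>
    (List.range' (l1 + 1) (L - (l1 + 1))).all fun l2 =>
      (List.range C).all fun c1 =>
        (List.range' (c1 + 1) (C - (c1 + 1))).all fun c2 =>
          eh_legal (pvSlice mat l1 l2 c1 c2)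

def maior_submatriz_super_legal (A : List (List Int)) : Int :=
  let L := A.length
  let C := (A.headI).length
  (List.range L).foldl (fun melhor l1 =>
    (List.range' (l1 + 1) (L - (l1 + 1))).foldl (fun melhor l2 =>
      (List.range C).foldl (fun melhor c1 =>
        (List.range' (c1 + 1) (C - (c1 + 1))).foldl (fun melhor c2 =>
          if eh_super_legal (pvSlice A l1 l2 c1 c2) then
            let area : Int := ((l2 : Int) - (l1 : Int) + 1) * ((c2 : Int) - (c1 : Int) + 1)
            if area > melhor then area else melhor
          else melhor) melhor) melhor) melhor) 0

-- ===== PORT B =====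
def maior_submatriz_super_legal_alt (A : List (List Int)) : Int :=
  let L := A.length
  let C := (A.headI).length
  let good : List (List Bool) :=
    (List.range (L - 1)).map fun i =>
      (List.range (C - 1)).map fun j =>
        decide ((A.getD i []).getD j 0 + (A.getD (i + 1) []).getD (j + 1) 0 ≤
                (A.getD i []).getD (j + 1) 0 + (A.getD (i + 1) []).getD j 0)
  (List.range L).foldl (fun melhor l1 =>
    (List.range' (l1 + 1) (L - (l1 + 1))).foldl (fun melhor l2 =>
      (List.range C).foldl (fun melhor c1 =>
        (List.range' (c1 + 1) (C - (c1 + 1))).foldl (fun melhor c2 =>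
          if (List.range' l1 (l2 - l1)).all (fun i =>
               (List.range' c1 (c2 - c1)).all (fun j => (good.getD i []).getD j false))
          then
            let area : Int := ((l2 : Int) - (l1 : Int) + 1) * ((c2 : Int) - (c1 : Int) + 1)
            if area > melhor then area else melhor
          else melhor) melhor) melhor) melhor) 0

-- ===== PRECONDITION & SPEC =====
-- Pre_ excludes exactly the inputs where Python A raises IndexError: the empty list (A[0]),
-- and, when the search loops do run (L ≥ 2 and C ≥ 2), any row shorter than len(A[0])
-- (the 2-column-wide rectangle ending at the short row's truncation point always IndexErrors
-- inside eh_legal before A can return).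
def Pre_maior_submatriz_super_legal (A : List (List Int)) : Prop :=
  A ≠ [] ∧ (2 ≤ A.length → 2 ≤ (A.headI).length →
    ∀ row ∈ A, (A.headI).length ≤ row.length)
instance (A : List (List Int)) : Decidable (Pre_maior_submatriz_super_legal A) := by
  unfold Pre_maior_submatriz_super_legal; infer_instance

def pvWitness_maior_submatriz_super_legal : List (List Int) := [[0, 1], [1, 0]]

def Spec_maior_submatriz_super_legal (A : List (List Int)) (out : Int) : Prop := out = maior_submatriz_super_legal_alt A
instance (A : List (List Int)) (out : Int) : Decidable (Spec_maior_submatriz_super_legal A out) := by unfold Spec_maior_submatriz_super_legal; infer_instance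

-- ===== CLAIM (what is proved, stated in full; the proofs are below) =====
def Claim_equal_maior_submatriz_super_legal : Prop := ∀ (A : List (List Int)), Dom_maior_submatriz_super_legal A → Pre_maior_submatriz_super_legal A → Spec_maior_submatriz_super_legal A (maior_submatriz_super_legal A)

-- ===== LEMMAS AND PROOFS =====

-- adjacent-2x2 Monge condition, general corner condition, and the shape invariant
def pvAdj (m : List (List Int)) (i j : Nat) : Prop :=
  pvIdx m i j + pvIdx m (i + 1) (j + 1) ≤ pvIdx m i (j + 1) + pvIdx m (i + 1) j

def pvCorner (m : List (List Int)) (r1 r2 s1 s2 : Nat) : Prop :=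
  pvIdx m r1 s1 + pvIdx m r2 s2 ≤ pvIdx m r1 s2 + pvIdx m r2 s1

-- first row has length mC and every row at least that (what Pre_ gives on the admitted inputs)
def pvRect (m : List (List Int)) (mC : Nat) : Prop :=
  m ≠ [] ∧ (m.headI).length = mC ∧ ∀ row ∈ m, mC ≤ row.length

theorem row_slice (m : List (List Int)) (mC p q r s i : Nat)
    (_h : pvRect m mC) (hq : q < m.length) (_hs : s < mC) (hp : p ≤ q) (hi : i ≤ q - p) :
    (pvSlice m p q r s)[i]? = some ((m[p+i]'(by omega)).drop r |>.take (s + 1 - r)) := by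
  unfold pvSlice
  rw [List.getElem?_map, List.getElem?_take, if_pos (by omega), List.getElem?_drop,
      List.getElem?_eq_getElem (by omega)]
  rfl

theorem pvIdx_slice (m : List (List Int)) (mC p q r s i j : Nat)
    (h : pvRect m mC) (hq : q < m.length) (hs : s < mC)
    (hp : p ≤ q) (hr : r ≤ s) (hi : i ≤ q - p) (hj : j ≤ s - r) :
    pvIdx (pvSlice m p q r s) i j = pvIdx m (p + i) (r + j) := by
  have hpi : p + i < m.length := by omega
  have hrow : mC ≤ (m[p+i]'hpi).length := h.2.2 _ (List.getElem_mem _)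
  unfold pvIdx
  simp only [List.getD_eq_getElem?_getD]
  rw [row_slice m mC p q r s i h hq hs hp hi]
  simp only [Option.getD_some]
  rw [List.getElem?_take, if_pos (by omega), List.getElem?_drop,
      List.getElem?_eq_getElem (by omega), Option.getD_some,
      List.getElem?_eq_getElem hpi, Option.getD_some,
      List.getElem?_eq_getElem (by omega), Option.getD_some]

theorem pvRect_slice (m : List (List Int)) (mC p q r s : Nat)
    (h : pvRect m mC) (hq : q < m.length) (hs : s < mC) (hp : p ≤ q) (hr : r ≤ s) :
    pvRect (pvSlice m p q r s) (s + 1 - r) ∧ (pvSlice m p q r s).length = q + 1 - p := by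
  have hlen : (pvSlice m p q r s).length = q + 1 - p := by
    unfold pvSlice; simp [List.length_take, List.length_drop]; omega
  refine ⟨⟨?_, ?_, ?_⟩, hlen⟩
  · intro hnil; rw [hnil] at hlen; simp at hlen; omega
  · have h0 : (pvSlice m p q r s)[0]? = some ((m[p+0]'(by omega)).drop r |>.take (s + 1 - r)) :=
      row_slice m mC p q r s 0 h hq hs hp (by omega)
    simp only [Nat.add_zero] at h0
    have hrow : mC ≤ (m[p]'(by omega)).length := h.2.2 _ (List.getElem_mem _)
    have : (pvSlice m p q r s).headI = ((m[p]'(by omega)).drop r |>.take (s + 1 - r)) := by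
      cases hm : pvSlice m p q r s with
      | nil => rw [hm] at h0; simp at h0
      | cons a t => rw [hm] at h0; simp only [List.getElem?_cons_zero, Option.some.injEq] at h0; simp [h0]
    rw [this]; simp [List.length_take, List.length_drop]; omega
  · intro row hrowmem
    unfold pvSlice at hrowmem
    obtain ⟨linha, hlm, rfl⟩ := List.mem_map.1 hrowmem
    have : linha ∈ m := List.mem_of_mem_drop (List.mem_of_mem_take hlm)
    have := h.2.2 _ this
    simp [List.length_take, List.length_drop]; omega

theorem eh_legal_iff (mat : List (List Int)) :
    eh_legal mat = true ↔ ∀ i j, 1 ≤ i → i < mat.length → 1 ≤ j → j < (mat.headI).length →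
      pvIdx mat 0 0 + pvIdx mat i j ≤ pvIdx mat 0 j + pvIdx mat i 0 := by
  unfold eh_legal
  simp only [List.all_eq_true, List.mem_range'_1, Bool.not_eq_true', decide_eq_false_iff_not, not_lt]
  constructor
  · intro H i j hi hiL hj hjC
    exact H i ⟨hi, by omega⟩ j ⟨hj, by omega⟩
  · intro H i hi j hj
    exact H i j hi.1 (by omega) hj.1 (by omega)

theorem pvTeleRow (m : List (List Int)) (r s1 : Nat) :
    ∀ d, (∀ j, s1 ≤ j → j < s1 + d → pvAdj m r j) → pvCorner m r (r + 1) s1 (s1 + d) := by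
  intro d
  induction d with
  | zero => intro _; unfold pvCorner; simp only [Nat.add_zero]; omega
  | succ d ih =>
    intro H
    have h1 := ih (fun j h1 h2 => H j h1 (by omega))
    have h2 := H (s1 + d) (by omega) (by omega)
    unfold pvCorner at *
    unfold pvAdj at h2
    have : s1 + (d + 1) = s1 + d + 1 := by omega
    rw [this]
    omega

theorem pvTele (m : List (List Int)) (r1 s1 : Nat) :
    ∀ e d, (∀ i j, r1 ≤ i → i < r1 + e → s1 ≤ j → j < s1 + d → pvAdj m i j) →
      pvCorner m r1 (r1 + e) s1 (s1 + d) := by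
  intro e
  induction e with
  | zero => intro d _; unfold pvCorner; simp only [Nat.add_zero]; omega
  | succ e ih =>
    intro d H
    have h1 := ih d (fun i j hi1 hi2 hj1 hj2 => H i j hi1 (by omega) hj1 hj2)
    have h2 := pvTeleRow m (r1 + e) s1 d (fun j hj1 hj2 => H (r1 + e) j (by omega) (by omega) hj1 hj2)
    unfold pvCorner at *
    have : r1 + (e + 1) = r1 + e + 1 := by omega
    rw [this]
    omega

theorem corner_iff_adj (m : List (List Int)) (l1 l2 c1 c2 : Nat) :
    (∀ r1 r2 s1 s2, l1 ≤ r1 → r1 < r2 → r2 ≤ l2 → c1 ≤ s1 → s1 < s2 → s2 ≤ c2 →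
        pvCorner m r1 r2 s1 s2) ↔
    (∀ i j, l1 ≤ i → i < l2 → c1 ≤ j → j < c2 → pvAdj m i j) := by
  constructor
  · intro H i j h1 h2 h3 h4
    exact H i (i + 1) j (j + 1) h1 (by omega) (by omega) h3 (by omega) (by omega)
  · intro H r1 r2 s1 s2 h1 h2 h3 h4 h5 h6
    have := pvTele m r1 s1 (r2 - r1) (s2 - s1)
      (fun i j hi1 hi2 hj1 hj2 => H i j (by omega) (by omega) (by omega) (by omega))
    have e1 : r1 + (r2 - r1) = r2 := by omega
    have e2 : s1 + (s2 - s1) = s2 := by omega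
    rwa [e1, e2] at this

theorem eh_super_legal_iff (m : List (List Int)) (mC : Nat) (h : pvRect m mC) :
    eh_super_legal m = true ↔
      ∀ r1 r2 s1 s2, r1 < r2 → r2 < m.length → s1 < s2 → s2 < mC → pvCorner m r1 r2 s1 s2 := by
  have hC : (m.headI).length = mC := h.2.1
  unfold eh_super_legal
  rw [hC]
  simp only [List.all_eq_true, List.mem_range, List.mem_range'_1]
  constructor
  · intro H r1 r2 s1 s2 h12 hL h34 hCb
    have hkey := H r1 (by omega) r2 ⟨by omega, by omega⟩ s1 (by omega) s2 ⟨by omega, by omega⟩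
    rw [eh_legal_iff] at hkey
    obtain ⟨hrect, hlen⟩ := pvRect_slice m mC r1 r2 s1 s2 h hL (by omega) (by omega) (by omega)
    have hhead := hrect.2.1
    have := hkey (r2 - r1) (s2 - s1) (by omega) (by omega) (by omega) (by omega)
    rw [pvIdx_slice m mC r1 r2 s1 s2 0 0 h hL (by omega) (by omega) (by omega) (by omega) (by omega),
        pvIdx_slice m mC r1 r2 s1 s2 (r2 - r1) (s2 - s1) h hL (by omega) (by omega) (by omega) (by omega) (by omega),
        pvIdx_slice m mC r1 r2 s1 s2 0 (s2 - s1) h hL (by omega) (by omega) (by omega) (by omega) (by omega),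
        pvIdx_slice m mC r1 r2 s1 s2 (r2 - r1) 0 h hL (by omega) (by omega) (by omega) (by omega) (by omega)] at this
    unfold pvCorner
    have e1 : r1 + 0 = r1 := by omega
    have e2 : s1 + 0 = s1 := by omega
    have e3 : r1 + (r2 - r1) = r2 := by omega
    have e4 : s1 + (s2 - s1) = s2 := by omega
    rwa [e1, e2, e3, e4] at this
  · intro H l1 hl1 l2 hl2 c1 hc1 c2 hc2
    rw [eh_legal_iff]
    intro i j hi hiL hj hjC
    obtain ⟨hrect, hlen⟩ := pvRect_slice m mC l1 l2 c1 c2 h (by omega) (by omega) (by omega) (by omega)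
    rw [hlen] at hiL
    rw [hrect.2.1] at hjC
    rw [pvIdx_slice m mC l1 l2 c1 c2 0 0 h (by omega) (by omega) (by omega) (by omega) (by omega) (by omega),
        pvIdx_slice m mC l1 l2 c1 c2 i j h (by omega) (by omega) (by omega) (by omega) (by omega) (by omega),
        pvIdx_slice m mC l1 l2 c1 c2 0 j h (by omega) (by omega) (by omega) (by omega) (by omega) (by omega),
        pvIdx_slice m mC l1 l2 c1 c2 i 0 h (by omega) (by omega) (by omega) (by omega) (by omega) (by omega)]
    have e1 : l1 + 0 = l1 := by omega
    have e2 : c1 + 0 = c1 := by omega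
    rw [e1, e2]
    exact H l1 (l1 + i) c1 (c1 + j) (by omega) (by omega) (by omega) (by omega)

theorem cond_eq (A : List (List Int)) (l1 l2 c1 c2 : Nat)
    (hrect : pvRect A ((A.headI).length))
    (h1 : l1 < l2) (hL : l2 < A.length) (h2 : c1 < c2) (hC : c2 < (A.headI).length) :
    eh_super_legal (pvSlice A l1 l2 c1 c2) =
      ((List.range' l1 (l2 - l1)).all (fun i =>
        (List.range' c1 (c2 - c1)).all (fun j =>
          (((List.range (A.length - 1)).map fun i =>
            (List.range ((A.headI).length - 1)).map fun j =>
              decide ((A.getD i []).getD j 0 + (A.getD (i + 1) []).getD (j + 1) 0 ≤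
                (A.getD i []).getD (j + 1) 0 + (A.getD (i + 1) []).getD j 0)).getD i []).getD j false))) := by
  obtain ⟨hrS, hlenS⟩ := pvRect_slice A ((A.headI).length) l1 l2 c1 c2 hrect hL hC (by omega) (by omega)
  rw [Bool.eq_iff_iff]
  rw [eh_super_legal_iff _ _ hrS]
  rw [hlenS]
  simp only [List.all_eq_true, List.mem_range'_1]
  constructor
  · intro H i hi j hj
    rw [PySem.List.getD_map_range _ _ _ _ (by omega), PySem.List.getD_map_range _ _ _ _ (by omega),
        decide_eq_true_iff]
    have := H (i - l1) (i - l1 + 1) (j - c1) (j - c1 + 1) (by omega) (by omega) (by omega) (by omega)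
    unfold pvCorner at this
    rw [pvIdx_slice A _ l1 l2 c1 c2 (i - l1) (j - c1) hrect hL hC (by omega) (by omega) (by omega) (by omega),
        pvIdx_slice A _ l1 l2 c1 c2 (i - l1 + 1) (j - c1 + 1) hrect hL hC (by omega) (by omega) (by omega) (by omega),
        pvIdx_slice A _ l1 l2 c1 c2 (i - l1) (j - c1 + 1) hrect hL hC (by omega) (by omega) (by omega) (by omega),
        pvIdx_slice A _ l1 l2 c1 c2 (i - l1 + 1) (j - c1) hrect hL hC (by omega) (by omega) (by omega) (by omega)] at this
    have e1 : l1 + (i - l1) = i := by omega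
    have e2 : c1 + (j - c1) = j := by omega
    have e3 : l1 + (i - l1 + 1) = i + 1 := by omega
    have e4 : c1 + (j - c1 + 1) = j + 1 := by omega
    rw [e1, e2, e3, e4] at this
    exact this
  · intro H r1 r2 s1 s2 h12 hr2 h34 hs2
    have hadj : ∀ i j, l1 ≤ i → i < l2 → c1 ≤ j → j < c2 → pvAdj A i j := by
      intro i j hi1 hi2 hj1 hj2
      have := H i ⟨hi1, by omega⟩ j ⟨hj1, by omega⟩
      rw [PySem.List.getD_map_range _ _ _ _ (by omega), PySem.List.getD_map_range _ _ _ _ (by omega),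
          decide_eq_true_iff] at this
      exact this
    have hcor := (corner_iff_adj A l1 l2 c1 c2).2 hadj (l1 + r1) (l1 + r2) (c1 + s1) (c1 + s2)
      (by omega) (by omega) (by omega) (by omega) (by omega) (by omega)
    unfold pvCorner at *
    rw [pvIdx_slice A _ l1 l2 c1 c2 r1 s1 hrect hL hC (by omega) (by omega) (by omega) (by omega),
        pvIdx_slice A _ l1 l2 c1 c2 r2 s2 hrect hL hC (by omega) (by omega) (by omega) (by omega),
        pvIdx_slice A _ l1 l2 c1 c2 r1 s2 hrect hL hC (by omega) (by omega) (by omega) (by omega),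
        pvIdx_slice A _ l1 l2 c1 c2 r2 s1 hrect hL hC (by omega) (by omega) (by omega) (by omega)]
    exact hcor

-- ===== VERDICT (by name: the statement is the Claim_ definition above) =====
theorem maior_submatriz_super_legal_spec : Claim_equal_maior_submatriz_super_legal := by
  intro A _ hpre
  obtain ⟨hne, hrows⟩ := hpre
  unfold Spec_maior_submatriz_super_legal
  simp only [maior_submatriz_super_legal, maior_submatriz_super_legal_alt]
  apply PySem.List.foldl_congr_mem
  intro m1 l1 hl1
  apply PySem.List.foldl_congr_mem
  intro m2 l2 hl2
  apply PySem.List.foldl_congr_mem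
  intro m3 c1 hc1
  apply PySem.List.foldl_congr_mem
  intro m4 c2 hc2
  rw [List.mem_range'_1] at hl2 hc2
  rw [List.mem_range] at hl1 hc1
  have hrect : pvRect A ((A.headI).length) :=
    ⟨hne, rfl, hrows (by omega) (by omega)⟩
  rw [cond_eq A l1 l2 c1 c2 hrect (by omega) (by omega) (by omega) (by omega)]
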